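-- pv_equiv track=rewrite | github.com/sam-hunt/open-kattis | src/aliennumbers.py | toAlien
-- ===== SOURCE A (Python) =====
-- def toAlien(decimalNum, alang):
--     base, alienNum, step = len(alang), [], 0
--     while decimalNum > 0:
--         alienNum.append(alang[decimalNum % base])
--         decimalNum -= decimalNum % base
--         decimalNum = int(decimalNum / base)
--         step += 1
--     alienNum.reverse()
--     return ''.join(alienNum)
-- ===== SOURCE B (Python) =====
-- def toAlien(decimalNum, alang):
--     base = len(alang)
--     if decimalNum <= 0:
--         return ''
--     return toAlien(decimalNum // base, alang) + alang[decimalNum % base]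
-- ===== Notes on version B (the rewrite author's own statement) =====
-- stated objective: simpler
-- what changed: Replaced the append-then-reverse loop by a direct recursion that emits the most significant digit first, removing the list, the reverse, the unused step counter and the manual remainder subtraction.
import Mathlib
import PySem

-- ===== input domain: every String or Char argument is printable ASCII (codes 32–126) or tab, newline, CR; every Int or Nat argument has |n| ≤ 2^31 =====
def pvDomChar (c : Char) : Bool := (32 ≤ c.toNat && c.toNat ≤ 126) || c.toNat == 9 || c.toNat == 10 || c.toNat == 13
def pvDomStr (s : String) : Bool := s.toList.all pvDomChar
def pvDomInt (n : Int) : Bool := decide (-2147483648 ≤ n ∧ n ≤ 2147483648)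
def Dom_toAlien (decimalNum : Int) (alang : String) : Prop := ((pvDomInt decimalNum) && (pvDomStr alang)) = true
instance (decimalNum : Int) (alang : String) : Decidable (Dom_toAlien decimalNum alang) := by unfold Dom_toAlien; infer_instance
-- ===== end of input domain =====

-- B replaces A's append-then-reverse digit loop by a direct recursion emitting the most
-- significant digit first (no list, no reverse, no step counter); same asymptotic cost.
-- Note: within Dom (|n| ≤ 2^31) Python's `int(decimalNum / base)` is exact, so it is
-- ported as floor division of the (already remainder-free) numerator.

-- termination helper, cited by the ports' decreasing_by
theorem pvFloordivLt (n b : Int) (hn : 0 < n) (hb : 2 ≤ b) :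
    (PySem.Int.floordiv n b).toNat < n.toNat := by
  have h1 : PySem.Int.floordiv n b < n :=
    (PySem.Int.floordiv_lt_iff_lt_mul (by omega)).mpr (by nlinarith)
  have h2 : 0 ≤ PySem.Int.floordiv n b :=
    (PySem.Int.le_floordiv_iff_mul_le (by omega)).mpr (by omega)
  omega

-- floor division reduction used by port A's step: (n - n % b) / b = n // b
theorem pvFdSubMod (n b : Int) (hb : 0 < b) :
    PySem.Int.floordiv (n - PySem.Int.mod n b) b = PySem.Int.floordiv n b := by
  have h := PySem.Int.floordiv_mul_add_mod n b
  have : n - PySem.Int.mod n b = PySem.Int.floordiv n b * b := by omega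
  rw [this, PySem.Int.floordiv_eq_ediv_of_pos hb,
      Int.mul_ediv_cancel _ (by omega)]

-- ===== PORT A =====
-- A's while loop as a tail recursion over (decimalNum, alienNum); alang[n % base] is
-- PySem.List.pyGet? (always in range here since 0 ≤ n % base < base = len(alang)).
-- The guard `2 ≤ alang.length` only makes the recursion total: with base = 0 Python A
-- raises ZeroDivisionError and with base = 1 it loops forever — both outside Pre_.
def toAlienLoop (alang : List Char) (n : Int) (acc : List Char) : List Char :=
  if h : 0 < n ∧ 2 ≤ (alang.length : Int) then
    toAlienLoop alang
      (PySem.Int.floordiv (n - PySem.Int.mod n (alang.length : Int)) (alang.length : Int))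
      (acc ++ [(PySem.List.pyGet? alang (PySem.Int.mod n (alang.length : Int))).getD ' '])
  else acc
termination_by n.toNat
decreasing_by
  rw [pvFdSubMod _ _ (by omega)]
  exact pvFloordivLt _ _ h.1 (by exact_mod_cast h.2)

def toAlien (decimalNum : Int) (alang : String) : String :=
  String.ofList (toAlienLoop alang.toList decimalNum []).reverse

-- ===== PORT B =====
-- B's recursion: '' for n ≤ 0, else toAlien(n // base) + alang[n % base].
-- Same totality guard as above (Python B also raises / diverges for base ≤ 1, n > 0).
def toAlienRec (alang : List Char) (n : Int) : List Char :=
  if h : 0 < n ∧ 2 ≤ (alang.length : Int) then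
    toAlienRec alang (PySem.Int.floordiv n (alang.length : Int))
      ++ [(PySem.List.pyGet? alang (PySem.Int.mod n (alang.length : Int))).getD ' ']
  else []
termination_by n.toNat
decreasing_by exact pvFloordivLt _ _ h.1 (by exact_mod_cast h.2)

def toAlien_alt (decimalNum : Int) (alang : String) : String :=
  String.ofList (toAlienRec alang.toList decimalNum)

-- ===== PRECONDITION & SPEC =====
-- Pre_ excludes only inputs where Python A never returns: with decimalNum > 0, A raises
-- ZeroDivisionError when alang is empty and loops forever when alang has one character.
def Pre_toAlien (decimalNum : Int) (alang : String) : Prop :=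
  decimalNum ≤ 0 ∨ 2 ≤ alang.toList.length
instance (decimalNum : Int) (alang : String) : Decidable (Pre_toAlien decimalNum alang) := by
  unfold Pre_toAlien; infer_instance

def pvWitness_toAlien : Int × String := (5, "ab")

def Spec_toAlien (decimalNum : Int) (alang : String) (out : String) : Prop :=
  out = toAlien_alt decimalNum alang
instance (decimalNum : Int) (alang : String) (out : String) : Decidable (Spec_toAlien decimalNum alang out) := by
  unfold Spec_toAlien; infer_instance

-- ===== CLAIM (what is proved, stated in full; the proofs are below) =====
def Claim_equal_toAlien : Prop := ∀ (decimalNum : Int) (alang : String), Dom_toAlien decimalNum alang → Pre_toAlien decimalNum alang → Spec_toAlien decimalNum alang (toAlien decimalNum alang)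

-- ===== LEMMAS AND PROOFS =====

-- A's loop collects the digits least-significant first into acc; B's recursion returns
-- them most-significant first, so the loop result is acc ++ (B's digits reversed).
theorem toAlienLoop_eq (alang : List Char) (n : Int) (acc : List Char) :
    toAlienLoop alang n acc = acc ++ (toAlienRec alang n).reverse := by
  suffices h : ∀ (k : Nat) (n : Int), n.toNat ≤ k → ∀ acc : List Char,
      toAlienLoop alang n acc = acc ++ (toAlienRec alang n).reverse from
    h n.toNat n le_rfl acc
  intro k
  induction k with
  | zero =>
    intro n hn acc
    rw [toAlienLoop, toAlienRec]
    rw [dif_neg (by omega), dif_neg (by omega)]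
    simp
  | succ k ih =>
    intro n hn acc
    rw [toAlienLoop, toAlienRec]
    split
    · next hcond =>
      rw [pvFdSubMod _ _ (by omega)]
      have hlt := pvFloordivLt n (alang.length : Int) hcond.1 (by exact_mod_cast hcond.2)
      rw [ih _ (by omega)]
      simp
    · simp

-- ===== VERDICT (by name: the statement is the Claim_ definition above) =====
theorem toAlien_spec : Claim_equal_toAlien := by
  intro n alang _ _
  unfold Spec_toAlien toAlien toAlien_alt
  rw [toAlienLoop_eq]
  simp
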